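-- pv_equiv track=rewrite | github.com/aidanohora/Python-Practicals | p18p4.py | twostrings
-- ===== SOURCE A (Python) =====
-- def twostrings(x,y):
--     """takes two arguements and checks if either appear at the very end of the other string
--     Assumes both arguements are strings
--     Returns True if either appears at end of other, otherwise returns false
--     Non-case sensitive"""
--
--     x = x.lower()
--     y = y.lower()
--
--     if len(x) > len(y):
--         a = 0 - len(y)
--         b = 0
--         i = 0
--         j = 0
--         while i < len(y):
--             if x[a] == y[b]:
--                 j += 1
--                 a += 1
--                 b += 1
--                 i += 1
--             else:
--                 i += len(y)
--         if j == len(y):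
--             return True
--         else:
--             return False
--
--     elif len(x) == len(y):
--         if x == y:
--             return True
--         else:
--             return False
--
--     else:
--         a = 0 - len(x)
--         b = 0
--         i = 0
--         j = 0
--         while i < len(x):
--             if y[a] == x[b]:
--                 j += 1
--                 a += 1
--                 b += 1
--                 i += 1
--             else:
--                 i += len(x)
--         if j == len(x):
--             return True
--         else:
--             return False
-- ===== SOURCE B (Python) =====
-- def twostrings(x, y):
--     x = x.lower()
--     y = y.lower()
--     return x.endswith(y) or y.endswith(x)
-- ===== Notes on version B (the rewrite author's own statement) =====
-- stated objective: simpler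
-- what changed: Replaces A's three length-comparison branches and hand-rolled negative-index walking loop with a single boolean expression using str.endswith in both directions after lowercasing.
import Mathlib
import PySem

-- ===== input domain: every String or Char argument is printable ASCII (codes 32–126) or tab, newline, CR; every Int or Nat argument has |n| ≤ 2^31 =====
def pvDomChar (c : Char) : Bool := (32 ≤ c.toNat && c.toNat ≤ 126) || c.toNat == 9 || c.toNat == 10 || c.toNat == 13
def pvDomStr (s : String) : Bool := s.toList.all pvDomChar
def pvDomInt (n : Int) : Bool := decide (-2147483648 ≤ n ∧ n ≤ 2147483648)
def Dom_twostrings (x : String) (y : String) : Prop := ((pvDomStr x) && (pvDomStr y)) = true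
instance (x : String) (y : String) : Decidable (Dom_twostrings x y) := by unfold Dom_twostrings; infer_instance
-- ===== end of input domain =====

-- B replaces A's three length branches and hand-rolled negative-index matching loop
-- by a single boolean expression: lowercase both, then endswith in both directions (simpler).


-- ===== PORT A =====
-- A's while loop: a,b are Python indices (a negative), i the loop counter, j the match count.
-- i and j start at 0 and only ever grow, so they are Nat here; a stays Int (negative indexing
-- via PySem.List.pyGet?, exact). The character comparison x[a] == y[b] is ported as equality of
-- the two pyGet? results; A only ever reads in-range indices, so this is exact.
def twoLoop (u v : List Char) (a b : Int) (i j : Nat) : Nat :=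
  if i < v.length then
    if PySem.List.pyGet? u a = PySem.List.pyGet? v b then
      twoLoop u v (a + 1) (b + 1) (i + 1) (j + 1)
    else
      twoLoop u v a b (i + v.length) j
  else j
termination_by v.length - i
decreasing_by all_goals omega

def twostrings (x : String) (y : String) : Bool :=
  let u := (PySem.Str.lower x).toList
  let v := (PySem.Str.lower y).toList
  if u.length > v.length then
    twoLoop u v (0 - (v.length : Int)) 0 0 0 == v.length
  else if u.length == v.length then
    u == v
  else
    twoLoop v u (0 - (u.length : Int)) 0 0 0 == u.length

-- ===== PORT B =====
def twostrings_alt (x : String) (y : String) : Bool :=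
  let x := PySem.Str.lower x
  let y := PySem.Str.lower y
  PySem.Str.endswith x y || PySem.Str.endswith y x

-- ===== PRECONDITION & SPEC =====
def Spec_twostrings (x : String) (y : String) (out : Bool) : Prop := out = twostrings_alt x y
instance (x : String) (y : String) (out : Bool) : Decidable (Spec_twostrings x y out) := by unfold Spec_twostrings; infer_instance

-- ===== CLAIM (what is proved, stated in full; the proofs are below) =====
def Claim_equal_twostrings : Prop := ∀ (x : String) (y : String), Dom_twostrings x y → Spec_twostrings x y (twostrings x y)

-- ===== LEMMAS AND PROOFS =====

-- The loop started at step k (with a = k - |v|, b = i = j = k) reaches j = |v| exactly when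
-- the last |v| - k characters of u agree with the last |v| - k characters of v.
lemma twoLoop_spec (u v : List Char) (k : Nat)
    (hlen : v.length ≤ u.length) (hk : k ≤ v.length) :
    (twoLoop u v ((k : Int) - v.length) (k : Int) k k = v.length) ↔
      (List.drop (u.length - v.length + k) u = List.drop k v) := by
  generalize hfuel : v.length - k = fuel
  induction fuel generalizing k with
  | zero =>
      have hkv : k = v.length := by omega
      subst hkv
      rw [twoLoop]
      simp [List.drop_eq_nil_of_le, hlen]
  | succ n ih =>
      have hklt : k < v.length := by omega
      have hm : u.length - v.length + k < u.length := by omega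
      rw [twoLoop]
      have hgu : PySem.List.pyGet? u ((k : Int) - v.length) =
          some (u[u.length - v.length + k]'hm) := by
        have hneg : ¬ ((0:Int) ≤ (k : Int) - v.length) := by omega
        have hge : -((u.length : Int)) ≤ (k : Int) - v.length := by omega
        simp only [PySem.List.pyGet?, PySem.List.pyIdx?, if_neg hneg, if_pos hge]
        have heq : u.length - (-((k : Int) - v.length)).toNat = u.length - v.length + k := by
          omega
        rw [heq]
        simp [List.getElem?_eq_getElem hm]
      have hgv : PySem.List.pyGet? v (k : Int) = some (v[k]'hklt) := by
        have h0 : (0:Int) ≤ (k : Int) := by omega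
        have h1 : (k : Int) < v.length := by omega
        simp only [PySem.List.pyGet?, PySem.List.pyIdx?, if_pos h0, if_pos h1,
          Int.toNat_natCast]
        simp [List.getElem?_eq_getElem hklt]
      have hdu : List.drop (u.length - v.length + k) u =
          u[u.length - v.length + k]'hm :: List.drop (u.length - v.length + k + 1) u :=
        List.drop_eq_getElem_cons hm
      have hdv : List.drop k v = v[k]'hklt :: List.drop (k + 1) v :=
        List.drop_eq_getElem_cons hklt
      rw [if_pos hklt, hgu, hgv]
      by_cases hc : u[u.length - v.length + k]'hm = v[k]'hklt
      · rw [if_pos (by rw [hc])]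
        have e1 : (k : Int) - v.length + 1 = ((k + 1 : Nat) : Int) - v.length := by
          push_cast; ring
        have e2 : (k : Int) + 1 = ((k + 1 : Nat) : Int) := by push_cast; ring
        rw [e1, e2, ih (k + 1) (by omega) (by omega)]
        rw [hdu, hdv]
        have e3 : u.length - v.length + (k + 1) = u.length - v.length + k + 1 := by omega
        rw [e3]
        constructor
        · intro h; rw [hc, h]
        · intro h; exact List.tail_eq_of_cons_eq h
      · rw [if_neg (by simpa using hc)]
        rw [twoLoop]
        rw [if_neg (by omega)]
        constructor
        · intro h; omega
        · intro h
          rw [hdu, hdv] at h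
          exact absurd (List.head_eq_of_cons_eq h) hc

-- suffix ↔ drop equality, for lists of known relative length
lemma suffix_iff_drop (u v : List Char) (h : v.length ≤ u.length) :
    (v <:+ u) ↔ List.drop (u.length - v.length) u = v := by
  constructor
  · intro hs
    obtain ⟨t, ht⟩ := hs
    subst ht
    simp
  · intro hd
    refine ⟨List.take (u.length - v.length) u, ?_⟩
    conv_rhs => rw [← List.take_append_drop (u.length - v.length) u]
    rw [hd]

-- beq-result of the loop agrees with endswith, for |v| ≤ |u|
lemma loop_eq_endswith (u v : List Char) (h : v.length ≤ u.length) :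
    (twoLoop u v (0 - (v.length : Int)) 0 0 0 == v.length) = PySem.Chars.endswith u v := by
  have hloop := twoLoop_spec u v 0 h (Nat.zero_le _)
  simp only [Nat.cast_zero, zero_sub, Nat.add_zero, List.drop_zero] at hloop
  rw [Bool.eq_iff_iff, beq_iff_eq, PySem.Chars.endswith_iff, suffix_iff_drop u v h]
  have e : (0 : Int) - (v.length : Int) = -(v.length : Int) := by ring
  rw [e]
  exact hloop

-- endswith is false when the candidate suffix is strictly longer
lemma endswith_false_of_longer (u v : List Char) (h : u.length < v.length) :
    PySem.Chars.endswith u v = false := by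
  rw [← Bool.not_eq_true, PySem.Chars.endswith_iff]
  intro hs
  exact absurd hs.length_le (by omega)

theorem twostrings_eq_alt (x y : String) : twostrings x y = twostrings_alt x y := by
  unfold twostrings twostrings_alt
  simp only [PySem.Str.endswith_eq]
  generalize (PySem.Str.lower x).toList = u
  generalize (PySem.Str.lower y).toList = v
  by_cases h1 : u.length > v.length
  · rw [if_pos h1, endswith_false_of_longer v u h1, Bool.or_false]
    exact loop_eq_endswith u v (le_of_lt h1)
  · rw [if_neg h1]
    by_cases h2 : u.length = v.length
    · rw [if_pos (by simpa using h2)]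
      rcases eq_or_ne u v with he | he
      · subst he
        simp [PySem.Chars.endswith_iff]
      · have h3 : PySem.Chars.endswith u v = false := by
          rw [← Bool.not_eq_true, PySem.Chars.endswith_iff, suffix_iff_drop u v (le_of_eq h2.symm)]
          intro hd
          exact he (by rw [← hd, h2]; simp)
        have h4 : PySem.Chars.endswith v u = false := by
          rw [← Bool.not_eq_true, PySem.Chars.endswith_iff, suffix_iff_drop v u (le_of_eq h2)]
          intro hd
          exact he (by rw [← hd, h2]; simp)
        simp [h3, h4, he]
    · rw [if_neg (by simpa using h2)]
      have hlt : u.length < v.length := by omega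
      rw [endswith_false_of_longer u v hlt, Bool.false_or]
      exact loop_eq_endswith v u (le_of_lt hlt)

-- ===== VERDICT (by name: the statement is the Claim_ definition above) =====
theorem twostrings_spec : Claim_equal_twostrings := by
  intro x y _
  unfold Spec_twostrings
  exact twostrings_eq_alt x y
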